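-- pv_equiv track=rewrite | github.com/JSheldon3488/Daily_Coding_Problems | Chapter4_Stacks_and_Queues/4.4_Reconstruct_Array.py | reconstruct_book
-- ===== SOURCE A (Python) =====
-- def reconstruct_book(array):
--     """ The idea of their solution is that every time you see the next sign is a negative sign you need
--     to push the value you are at onto the stack to save it so you can go down for that negative. Then you
--      move on to the next number and repeat and eventually when you see a + again you will put the value you
--      are at in place and then put all the negatives in place. """
--     answer = []
--     n = len(array)-1
--     stack = []
--
--     for i in range(n):
--         if array[i+1] == "-":
--             stack.append(i)
--         else:
--             answer.append(i)
--             while stack: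
--                 answer.append(stack.pop())
--
--     stack.append(n)
--     while stack:
--         answer.append(stack.pop())
--
--     return answer
-- ===== SOURCE B (Python) =====
-- def reconstruct_book(array):
--     """Two-stage, stack-free: first list the breakpoints (indices where a block ends),
--     then emit each block as its end index followed by the reversed interior."""
--     n = len(array) - 1
--     breakpoints = [i for i in range(n) if array[i + 1] != "-"] + [n]
--     answer = []
--     prev = -1
--     for b in breakpoints:
--         answer.append(b)
--         answer.extend(range(b - 1, prev, -1))
--         prev = b
--     return answer
-- ===== Notes on version B (the rewrite author's own statement) =====
-- stated objective: alternative
-- what changed: Replaces A's single pass with an explicit stack and inner pop-loops by two stages: a comprehension collecting the breakpoint indices where blocks end, then a loop emitting each block as its end index plus a reversed range between consecutive breakpoints.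
import Mathlib
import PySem

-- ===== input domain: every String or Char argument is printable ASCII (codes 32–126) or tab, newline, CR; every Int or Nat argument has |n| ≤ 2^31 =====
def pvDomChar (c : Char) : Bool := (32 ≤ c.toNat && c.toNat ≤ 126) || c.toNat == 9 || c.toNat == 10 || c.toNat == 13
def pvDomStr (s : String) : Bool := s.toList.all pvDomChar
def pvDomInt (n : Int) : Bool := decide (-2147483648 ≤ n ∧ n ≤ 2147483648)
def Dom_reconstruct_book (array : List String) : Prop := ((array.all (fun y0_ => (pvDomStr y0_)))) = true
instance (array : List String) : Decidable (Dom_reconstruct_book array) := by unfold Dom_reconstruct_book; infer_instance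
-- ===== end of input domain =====

-- B drops A's stack and pop-loops: it first collects the breakpoint indices where blocks
-- end, then emits each block as its end index plus a reversed range — an alternative
-- two-stage decomposition of the same O(n) task.


-- ===== PORT A =====
-- stack is a List Int with head = top; 'while stack: answer.append(stack.pop())'
-- appends the stack top-down, i.e. 'ans ++ stk'.
def reconstruct_book (array : List String) : List Int :=
  let n : Int := (array.length : Int) - 1
  let st := (PySem.List.pyRange 0 n 1).foldl
    (fun (st : List Int × List Int) i =>
      if PySem.List.pyGet? array (i + 1) = some "-" then (st.1, i :: st.2)
      else (st.1 ++ i :: st.2, []))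
    ([], [])
  st.1 ++ n :: st.2

-- ===== PORT B =====
def reconstruct_book_alt (array : List String) : List Int :=
  let n : Int := (array.length : Int) - 1
  let breakpoints : List Int :=
    ((PySem.List.pyRange 0 n 1).filter
      (fun i => PySem.List.pyGet? array (i + 1) ≠ some "-")) ++ [n]
  (breakpoints.foldl
    (fun (acc : List Int × Int) b =>
      (acc.1 ++ b :: PySem.List.pyRange (b - 1) acc.2 (-1), b))
    ([], -1)).1

-- ===== PRECONDITION & SPEC =====
def Spec_reconstruct_book (array : List String) (out : List Int) : Prop := out = reconstruct_book_alt array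
instance (array : List String) (out : List Int) : Decidable (Spec_reconstruct_book array out) := by unfold Spec_reconstruct_book; infer_instance

-- ===== CLAIM (what is proved, stated in full; the proofs are below) =====
def Claim_equal_reconstruct_book : Prop := ∀ (array : List String), Dom_reconstruct_book array → Spec_reconstruct_book array (reconstruct_book array)

-- ===== LEMMAS AND PROOFS =====

-- Loop invariant: A's stack is exactly the reversed open range from the last processed
-- index down to (exclusive) B's `prev`, and the answers coincide.
lemma reconstruct_loop (array : List String) :
    ∀ (m : Nat) (a : Int) (ans : List Int) (prev : Int), prev < a →
      (let r := (PySem.List.pyRange a (a + m) 1).foldl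
          (fun (st : List Int × List Int) i =>
            if PySem.List.pyGet? array (i + 1) = some "-" then (st.1, i :: st.2)
            else (st.1 ++ i :: st.2, []))
          (ans, PySem.List.pyRange (a - 1) prev (-1))
       let s := ((PySem.List.pyRange a (a + m) 1).filter
            (fun i => PySem.List.pyGet? array (i + 1) ≠ some "-")).foldl
          (fun (acc : List Int × Int) b =>
            (acc.1 ++ b :: PySem.List.pyRange (b - 1) acc.2 (-1), b))
          (ans, prev)
       r.1 = s.1 ∧ r.2 = PySem.List.pyRange (a + m - 1) s.2 (-1) ∧ s.2 < a + m) := by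
  intro m
  induction m with
  | zero =>
      intro a ans prev hpa
      simpa [PySem.List.pyRange_one_eq_nil (le_refl a)] using hpa
  | succ m ih =>
      intro a ans prev hpa
      have hlt : a < a + ((m : Nat) + 1 : Nat) := by push_cast; omega
      rw [PySem.List.pyRange_one_cons hlt]
      simp only [List.foldl_cons, List.filter_cons]
      have hcons : PySem.List.pyRange a prev (-1)
          = a :: PySem.List.pyRange (a - 1) prev (-1) :=
        PySem.List.pyRange_neg_one_cons hpa
      have harr : a + ((m : Nat) + 1 : Nat) = (a + 1) + (m : Nat) := by push_cast; ring
      have hsub : a + 1 - 1 = a := by ring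
      by_cases hc : PySem.List.pyGet? array (a + 1) = some "-"
      · rw [if_pos hc]
        simp only [hc, ne_eq, not_true_eq_false, decide_false, if_neg Bool.false_ne_true]
        rw [← hcons, harr]
        have := ih (a + 1) ans prev (by omega)
        simpa only [hsub] using this
      · rw [if_neg hc]
        simp only [hc, ne_eq, not_false_eq_true, decide_true, if_true, List.foldl_cons]
        rw [harr]
        have hnil : PySem.List.pyRange a a (-1) = ([] : List Int) :=
          PySem.List.pyRange_neg_one_eq_nil le_rfl
        have := ih (a + 1) (ans ++ a :: PySem.List.pyRange (a - 1) prev (-1)) a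
          (by omega)
        simpa only [hsub, hnil, hcons] using this

-- ===== VERDICT (by name: the statement is the Claim_ definition above) =====
theorem reconstruct_book_spec : Claim_equal_reconstruct_book := by
  intro array _
  unfold Spec_reconstruct_book reconstruct_book reconstruct_book_alt
  cases array with
  | nil => decide
  | cons x xs =>
      set n : Int := ((x :: xs).length : Int) - 1 with hn
      have hn0 : 0 ≤ n := by simp [hn]
      have hnm : n = (0 : Int) + (n.toNat : Nat) := by omega
      have := reconstruct_loop (x :: xs) n.toNat 0 [] (-1) (by omega)
      rw [← hnm] at this
      simp only at this
      rw [show PySem.List.pyRange (0 - 1) (-1) (-1) = [] from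
        PySem.List.pyRange_neg_one_eq_nil (by omega)] at this
      obtain ⟨h1, h2, h3⟩ := this
      simp only [List.foldl_append, List.foldl_cons, List.foldl_nil]
      rw [h1, h2]
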